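-- pv_equiv track=rewrite | github.com/coling154/Lab4 | ch03_transposition_cipher.py | scramble2Decrypt2
-- ===== SOURCE A (Python) =====
-- def scramble2Decrypt2(cipherText):
--     if len(cipherText) % 2 == 0:
--         splitPoint = len(cipherText) // 2
--     else:
--         splitPoint = len(cipherText) // 2 + 1
--
--     evenChars = cipherText[:splitPoint]
--     oddChars = cipherText[splitPoint:]
--     plainText = ""
--     for i in range(max(len(evenChars), len(oddChars))):
--         if i < len(evenChars):
--             plainText += evenChars[i]
--         if i < len(oddChars):
--             plainText += oddChars[i]
--     return plainText
-- ===== SOURCE B (Python) =====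
-- def scramble2Decrypt2(cipherText):
--     n = len(cipherText)
--     sp = (n + 1) // 2
--     return ''.join(cipherText[i // 2 + (i % 2) * sp] for i in range(n))
-- ===== Notes on version B (the rewrite author's own statement) =====
-- stated objective: alternative
-- what changed: Replaces A's split-into-two-halves loop with per-iteration bounds checks and string += by a direct output-index formula: output position i reads cipherText[i//2 + (i%2)*ceil(n/2)], built in one comprehension with no halves and no conditionals.
import Mathlib
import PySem

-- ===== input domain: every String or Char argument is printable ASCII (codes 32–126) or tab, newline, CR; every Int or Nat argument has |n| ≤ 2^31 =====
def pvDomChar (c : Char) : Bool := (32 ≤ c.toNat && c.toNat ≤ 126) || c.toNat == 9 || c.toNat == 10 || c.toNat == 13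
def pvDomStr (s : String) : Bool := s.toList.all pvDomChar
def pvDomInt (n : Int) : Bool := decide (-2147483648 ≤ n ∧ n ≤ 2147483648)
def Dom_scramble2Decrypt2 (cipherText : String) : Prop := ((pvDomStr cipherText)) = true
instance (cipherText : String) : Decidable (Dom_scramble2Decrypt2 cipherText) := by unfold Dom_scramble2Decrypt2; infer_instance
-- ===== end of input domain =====

-- B replaces A's two-halves loop (with per-step bounds checks and string +=)
-- by a direct output-index formula cipherText[i//2 + (i%2)*ceil(n/2)] (objective: alternative).

-- ===== PORT A =====
-- len(cipherText) % 2 and // 2 act on the nonnegative length: Nat % and / are exact here.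
-- cipherText[:sp] / cipherText[sp:] with 0 ≤ sp are take/drop (PySem.List.slice_to / slice_from).
-- evenChars[i] / oddChars[i] are guarded by i < len, so pyGetD's default is never used.
def scramble2Decrypt2 (cipherText : String) : String :=
  let cs := cipherText.toList
  let splitPoint : Nat :=
    if cs.length % 2 == 0 then cs.length / 2 else cs.length / 2 + 1
  let evenChars := cs.take splitPoint
  let oddChars := cs.drop splitPoint
  let plainText :=
    (PySem.List.pyRange 0 (max evenChars.length oddChars.length : Nat) 1).foldl
      (fun acc i =>
        let acc1 := if i < (evenChars.length : Int) then acc ++ [PySem.List.pyGetD evenChars i ' '] else acc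
        if i < (oddChars.length : Int) then acc1 ++ [PySem.List.pyGetD oddChars i ' '] else acc1)
      []
  String.ofList plainText

-- ===== PORT B =====
-- (n + 1) // 2 on the nonnegative length is exact as Nat division; range(n) is pyRange;
-- cipherText[i//2 + (i%2)*sp] is pyGetD (the index is always in range, so the default is unused);
-- ''.join over the comprehension is String.ofList of the map.
def scramble2Decrypt2_alt (cipherText : String) : String :=
  let cs := cipherText.toList
  let n := cs.length
  let sp := (n + 1) / 2
  String.ofList ((PySem.List.pyRange 0 (n : Int) 1).map
    (fun i => PySem.List.pyGetD cs (PySem.Int.floordiv i 2 + PySem.Int.mod i 2 * (sp : Int)) ' '))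

-- ===== PRECONDITION & SPEC =====
def Spec_scramble2Decrypt2 (cipherText : String) (out : String) : Prop := out = scramble2Decrypt2_alt cipherText
instance (cipherText : String) (out : String) : Decidable (Spec_scramble2Decrypt2 cipherText out) := by unfold Spec_scramble2Decrypt2; infer_instance

-- ===== CLAIM (what is proved, stated in full; the proofs are below) =====
def Claim_equal_scramble2Decrypt2 : Prop := ∀ (cipherText : String), Dom_scramble2Decrypt2 cipherText → Spec_scramble2Decrypt2 cipherText (scramble2Decrypt2 cipherText)

-- ===== LEMMAS AND PROOFS =====

-- what A's loop appends at index i, in Nat-indexed form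
def pvStep (e o : List Char) (i : Nat) : List Char :=
  (if i < e.length then [e.getD i ' '] else []) ++ (if i < o.length then [o.getD i ' '] else [])

lemma pv_loopA_eq (e o : List Char) :
    (PySem.List.pyRange 0 (max e.length o.length : Nat) 1).foldl
      (fun acc i =>
        let acc1 := if i < (e.length : Int) then acc ++ [PySem.List.pyGetD e i ' '] else acc
        if i < (o.length : Int) then acc1 ++ [PySem.List.pyGetD o i ' '] else acc1)
      []
    = (List.range (max e.length o.length)).flatMap (pvStep e o) := by
  rw [PySem.List.pyRange_one]
  have hN : (((max e.length o.length : Nat) : Int) - 0).toNat = max e.length o.length := by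
    omega
  rw [hN, List.foldl_map]
  have hbody : ∀ (acc : List Char) (k : Nat),
      (fun acc i =>
        let acc1 := if i < (e.length : Int) then acc ++ [PySem.List.pyGetD e i ' '] else acc
        if i < (o.length : Int) then acc1 ++ [PySem.List.pyGetD o i ' '] else acc1)
        acc ((0 : Int) + (k : Int))
      = acc ++ pvStep e o k := by
    intro acc k
    simp only [zero_add, PySem.List.pyGetD_natCast, Nat.cast_lt, pvStep]
    split_ifs <;> simp
  rw [PySem.List.foldl_congr_mem (List.range (max e.length o.length)) _
        (fun acc k => acc ++ pvStep e o k) [] (fun acc x _ => hbody acc x),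
      PySem.List.foldl_append_eq_flatMap, List.nil_append]

-- A's interleaving loop, read off position by position: output index i takes
-- the i/2-th character of the even half when i is even, of the odd half when i is odd.
lemma pv_interleave_map : ∀ (e o : List Char), o.length ≤ e.length → e.length ≤ o.length + 1 →
    (List.range e.length).flatMap (pvStep e o)
    = (List.range (e.length + o.length)).map
        (fun i => if i % 2 = 0 then e.getD (i / 2) ' ' else o.getD (i / 2) ' ') := by
  intro e
  induction e with
  | nil =>
      intro o h1 _
      simp only [List.length_nil] at h1
      have : o = [] := List.eq_nil_of_length_eq_zero (by omega)
      subst this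
      simp
  | cons a e' ih =>
      intro o h1 h2
      cases o with
      | nil =>
          simp only [List.length_cons, List.length_nil] at h1 h2
          have he' : e' = [] := List.eq_nil_of_length_eq_zero (by omega)
          subst he'
          simp [pvStep]
      | cons b o' =>
          simp only [List.length_cons] at h1 h2
          have h1' : o'.length ≤ e'.length := by omega
          have h2' : e'.length ≤ o'.length + 1 := by omega
          simp only [List.length_cons]
          rw [List.range_succ_eq_map, List.flatMap_cons, List.flatMap_map]
          have hstep : ∀ i : Nat, pvStep (a :: e') (b :: o') i.succ = pvStep e' o' i := by
            intro i
            simp [pvStep]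
          have hmap : (List.range e'.length).flatMap (fun i => pvStep (a :: e') (b :: o') i.succ)
              = (List.range e'.length).flatMap (pvStep e' o') := by
            apply List.flatMap_congr
            intro i _
            exact hstep i
          rw [hmap, ih o' h1' h2']
          have h0 : pvStep (a :: e') (b :: o') 0 = [a, b] := by
            simp [pvStep]
          rw [h0]
          have hr : e'.length + 1 + (o'.length + 1) = (e'.length + o'.length) + 1 + 1 := by omega
          rw [hr, List.range_succ_eq_map, List.range_succ_eq_map]
          simp only [List.map_cons, List.map_map, List.cons_append, List.nil_append]
          simp only [List.cons_eq_cons]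
          refine ⟨by norm_num, by norm_num, ?_⟩
          apply List.map_congr_left
          intro i _
          have he2 : (i + 1 + 1) / 2 = i / 2 + 1 := by omega
          have hm2 : (i + 1 + 1) % 2 = i % 2 := by omega
          simp only [Function.comp_apply, Nat.succ_eq_add_one, he2, hm2, List.getD_cons_succ]

-- ===== VERDICT (by name: the statement is the Claim_ definition above) =====
theorem scramble2Decrypt2_spec : Claim_equal_scramble2Decrypt2 := by
  intro s _
  unfold Spec_scramble2Decrypt2 scramble2Decrypt2 scramble2Decrypt2_alt
  simp only []
  set cs := s.toList with hcs
  set n := cs.length with hn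
  have hsp : (if n % 2 == 0 then n / 2 else n / 2 + 1) = (n + 1) / 2 := by
    rcases Nat.even_or_odd n with h | h
    · have : n % 2 = 0 := Nat.even_iff.mp h
      simp [this]; omega
    · have : n % 2 = 1 := Nat.odd_iff.mp h
      simp [this]; omega
  rw [hsp]
  set sp := (n + 1) / 2 with hspdef
  set e := cs.take sp with he
  set o := cs.drop sp with ho
  have hsple : sp ≤ n := by omega
  have hle : e.length = sp := by simp [he]; omega
  have hlo : o.length = n - sp := by simp [ho, hn]
  have h1 : o.length ≤ e.length := by omega
  have h2 : e.length ≤ o.length + 1 := by omega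
  have hmax : max e.length o.length = e.length := Nat.max_eq_left h1
  rw [pv_loopA_eq, hmax, pv_interleave_map e o h1 h2]
  have hnn : e.length + o.length = n := by omega
  rw [hnn]
  -- reduce B's pyRange/Int arithmetic to the same Nat-indexed map
  rw [PySem.List.pyRange_one]
  have hN : ((n : Int) - 0).toNat = n := by omega
  rw [hN, List.map_map]
  refine congrArg String.ofList ?_
  apply List.map_congr_left
  intro k hk
  have hkn : k < n := List.mem_range.mp hk
  simp only [Function.comp, zero_add]
  have hfd : PySem.Int.floordiv (k : Int) 2 = ((k / 2 : Nat) : Int) := by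
    exact_mod_cast PySem.Int.floordiv_natCast k 2
  have hmd : PySem.Int.mod (k : Int) 2 = ((k % 2 : Nat) : Int) := by
    exact_mod_cast PySem.Int.mod_natCast k 2
  rw [hfd, hmd]
  have hcast : ((k / 2 : Nat) : Int) + ((k % 2 : Nat) : Int) * (sp : Int)
      = ((k / 2 + k % 2 * sp : Nat) : Int) := by push_cast; ring
  rw [hcast, PySem.List.pyGetD_natCast]
  -- both sides are Nat getD on cs = e ++ o
  have hco : cs = e ++ o := (List.take_append_drop sp cs).symm
  by_cases hpar : k % 2 = 0
  · have hidx : k / 2 + k % 2 * sp = k / 2 := by simp [hpar]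
    have hlt : k / 2 < e.length := by rw [hle]; omega
    rw [if_pos hpar, hidx, hco, List.getD_append _ _ _ _ hlt]
  · have hk1 : k % 2 = 1 := by omega
    have hidx : k / 2 + k % 2 * sp = e.length + k / 2 := by rw [hk1, hle, one_mul, Nat.add_comm]
    rw [if_neg hpar, hidx, hco, List.getD_eq_getElem?_getD, List.getD_eq_getElem?_getD,
        List.getElem?_append_right (Nat.le_add_right _ _)]
    have : e.length + k / 2 - e.length = k / 2 := Nat.add_sub_cancel_left e.length (k / 2)
    rw [this]
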